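-- pv_equiv track=rewrite | github.com/donkhan/msc | DiscreteMaths/Grimaldi/src/build_list.py | solve
-- ===== SOURCE A (Python) =====
-- def solve(s):
--     from itertools import combinations
--     length = len(s)
--     l = []
--     for i in range(1,length+1):
--         sl = list(combinations(s,i))
--         for e in sl:
--             l.append(''.join(e))
--     l = sorted(l)
--     return l
-- ===== SOURCE B (Python) =====
-- def solve(s):
--     subs = ['']
--     for ch in s:
--         subs += [t + ch for t in subs]
--     return sorted(subs[1:])
-- ===== Notes on version B (the rewrite author's own statement) =====
-- stated objective: simpler
-- what changed: Replaces the nested length-loop over itertools.combinations by iterative doubling: start from [''] and, for each character, append it to every subsequence built so far, so the list ends up indexed by bitmasks; drop the leading empty string and sort.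
import Mathlib
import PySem

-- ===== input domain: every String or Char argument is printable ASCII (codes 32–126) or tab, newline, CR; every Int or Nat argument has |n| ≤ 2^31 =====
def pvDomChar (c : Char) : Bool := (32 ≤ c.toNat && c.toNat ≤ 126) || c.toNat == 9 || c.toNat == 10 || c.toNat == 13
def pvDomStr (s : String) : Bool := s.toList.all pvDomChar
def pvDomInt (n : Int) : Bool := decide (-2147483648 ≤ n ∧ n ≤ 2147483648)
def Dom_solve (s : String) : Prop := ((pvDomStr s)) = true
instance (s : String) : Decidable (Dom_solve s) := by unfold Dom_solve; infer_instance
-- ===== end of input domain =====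

-- B replaces the nested length-loop over itertools.combinations by iterative doubling (each char appended to every subsequence built so far; index = bitmask); simpler decomposition.

-- ===== PORT A =====
-- itertools.combinations(s, i) in position-lexicographic order, each combination as a List Char
def combosA : Nat → List Char → List (List Char)
  | 0, _ => [[]]
  | _ + 1, [] => []
  | i + 1, c :: cs => (combosA i cs).map (fun e => c :: e) ++ combosA (i + 1) cs

def solve (s : String) : List String :=
  PySem.List.sorted
    ((PySem.List.pyRange 1 (PySem.Str.len s + 1) 1).foldl
      (fun l i =>
        (combosA i.toNat s.toList).foldl (fun l e => l ++ [String.mk e]) l)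
      [])
    (fun x => x) false

-- ===== PORT B =====
def solve_alt (s : String) : List String :=
  PySem.List.sorted
    ((PySem.List.slice
        (s.toList.foldl (fun subs ch => subs ++ subs.map (fun t => t ++ [ch])) [[]])
        (some 1) none).map String.mk)
    (fun x => x) false

-- ===== PRECONDITION & SPEC =====
def Spec_solve (s : String) (out : List String) : Prop := out = solve_alt s
instance (s : String) (out : List String) : Decidable (Spec_solve s out) := by unfold Spec_solve; infer_instance

-- ===== CLAIM (what is proved, stated in full; the proofs are below) =====
def Claim_equal_solve : Prop := ∀ (s : String), Dom_solve s → Spec_solve s (solve s)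

-- ===== LEMMAS AND PROOFS =====

-- the subsequence of cs selected by the bits of m (bit 0 = head)
def maskSub (m : Int) : List Char → List Char
  | [] => []
  | c :: cs =>
    (if PySem.Int.mod m 2 = 1 then [c] else []) ++ maskSub (PySem.Int.floordiv m 2) cs

theorem maskSub_zero (cs : List Char) : maskSub 0 cs = [] := by
  induction cs with
  | nil => rfl
  | cons c cs ih => simp [maskSub, PySem.Int.mod, PySem.Int.floordiv, ih]

theorem maskSub_even (q : Int) (c : Char) (cs : List Char) :
    maskSub (2 * q) (c :: cs) = maskSub q cs := by
  have hm : PySem.Int.mod (2 * q) 2 = (2 * q) % 2 :=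
    PySem.Int.mod_eq_emod_of_pos (by norm_num)
  have hd : PySem.Int.floordiv (2 * q) 2 = (2 * q) / 2 :=
    PySem.Int.floordiv_eq_ediv_of_pos (by norm_num)
  have h1 : (2 * q) % 2 = 0 := by omega
  have h2 : (2 * q) / 2 = q := by omega
  rw [maskSub, hm, hd, h1, h2]
  simp

theorem maskSub_odd (q : Int) (c : Char) (cs : List Char) :
    maskSub (2 * q + 1) (c :: cs) = c :: maskSub q cs := by
  have hm : PySem.Int.mod (2 * q + 1) 2 = (2 * q + 1) % 2 :=
    PySem.Int.mod_eq_emod_of_pos (by norm_num)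
  have hd : PySem.Int.floordiv (2 * q + 1) 2 = (2 * q + 1) / 2 :=
    PySem.Int.floordiv_eq_ediv_of_pos (by norm_num)
  have h1 : (2 * q + 1) % 2 = 1 := by omega
  have h2 : (2 * q + 1) / 2 = q := by omega
  rw [maskSub, hm, hd, h1, h2]
  simp

-- pointwise Perm congruence for flatMap
theorem flatMap_perm_of_forall {α β : Type} (l : List α) (f g : α → List β)
    (h : ∀ x, (f x).Perm (g x)) : (l.flatMap f).Perm (l.flatMap g) := by
  induction l with
  | nil => simp
  | cons a l ih => simpa using (h a).append ih

-- combosA agrees with Mathlib's sublistsLen up to permutation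
theorem combosA_perm (cs : List Char) : ∀ k, (combosA k cs).Perm (List.sublistsLen k cs) := by
  induction cs with
  | nil => intro k; cases k <;> simp [combosA]
  | cons c cs ih =>
    intro k
    cases k with
    | zero => simp [combosA]
    | succ i =>
      simp only [combosA, List.sublistsLen_succ_cons]
      exact (((ih i).map _).append (ih (i + 1))).trans List.perm_append_comm

-- parity split of a Nat range, up to permutation
theorem range_two_mul_perm {β : Type} [DecidableEq β] (g : Nat → β) (K : Nat) :
    ((List.range (2 * K)).map g).Perm
      ((List.range K).map (fun q => g (2 * q)) ++ (List.range K).map (fun q => g (2 * q + 1))) := by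
  induction K with
  | zero => simp
  | succ K ih =>
    have h2 : 2 * (K + 1) = (2 * K + 1) + 1 := by omega
    rw [List.perm_iff_count]
    intro x
    have hc := ih.count_eq x
    simp only [h2, List.range_succ, List.map_append, List.count_append, List.map_cons] at *
    simp [List.count_cons, List.count_append] at hc ⊢
    omega

-- B's enumeration (with mask 0 included) is a permutation of sublists'
theorem maskRange_perm (cs : List Char) :
    ((List.range (2 ^ cs.length)).map (fun q : Nat => maskSub (q : Int) cs)).Perm
      (List.sublists' cs) := by
  induction cs with
  | nil =>
    simp [List.range_one, maskSub]
  | cons c cs ih =>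
    have hl : 2 ^ (c :: cs).length = 2 * 2 ^ cs.length := by
      rw [List.length_cons, pow_succ, mul_comm]
    rw [hl]
    refine (range_two_mul_perm (fun q : Nat => maskSub (q : Int) (c :: cs)) (2 ^ cs.length)).trans ?_
    have he : (List.range (2 ^ cs.length)).map (fun q : Nat => maskSub ((2 * q : Nat) : Int) (c :: cs))
        = (List.range (2 ^ cs.length)).map (fun q : Nat => maskSub (q : Int) cs) := by
      apply List.map_congr_left; intro q _
      have hq : ((2 * q : Nat) : Int) = 2 * (q : Int) := by push_cast; ring
      rw [hq]; exact maskSub_even (q : Int) c cs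
    have ho : (List.range (2 ^ cs.length)).map (fun q : Nat => maskSub ((2 * q + 1 : Nat) : Int) (c :: cs))
        = ((List.range (2 ^ cs.length)).map (fun q : Nat => maskSub (q : Int) cs)).map (fun e => c :: e) := by
      rw [List.map_map]
      apply List.map_congr_left; intro q _
      have hq : ((2 * q + 1 : Nat) : Int) = 2 * (q : Int) + 1 := by push_cast; ring
      rw [hq]
      exact maskSub_odd (q : Int) c cs
    rw [List.sublists'_cons, he, ho]
    exact ih.append (ih.map _)

-- A's unsorted list (at the List Char level), with [] prepended, is a permutation of sublists'
theorem combos_range_perm (cs : List Char) :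
    ([] :: (List.range cs.length).flatMap (fun k => combosA (k + 1) cs)).Perm
      (List.sublists' cs) := by
  have h : ((List.range (cs.length + 1)).flatMap fun n => List.sublistsLen n cs).Perm
      (List.sublists' cs) := List.range_bind_sublistsLen_perm cs
  refine List.Perm.trans ?_ h
  rw [List.range_succ_eq_map, List.flatMap_cons, List.sublistsLen_zero, List.flatMap_map]
  exact List.Perm.cons _ (flatMap_perm_of_forall _ _ _ (fun k => combosA_perm cs (k + 1)))

-- pyRange 1 (n+1) 1 as a Nat range
theorem pyRange_one_succ (n : Nat) :
    PySem.List.pyRange 1 ((n : Int) + 1) 1 = (List.range n).map (fun k : Nat => ((k : Int) + 1)) := by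
  rw [PySem.List.pyRange_one]
  have h : ((n : Int) + 1 - 1).toNat = n := by omega
  rw [h]
  apply List.map_congr_left; intro k _; omega

-- flatMap of singletons is a map
theorem flatMap_single {α β : Type} (l : List α) (f : α → β) :
    l.flatMap (fun x => [f x]) = l.map f := by
  induction l with
  | nil => rfl
  | cons a l ih => simp [ih]

-- List.range (2*K) enumerated in (even, odd) pairs
theorem range_pair (K : Nat) :
    List.range (2 * K) = (List.range K).flatMap (fun q => [2 * q, 2 * q + 1]) := by
  induction K with
  | zero => simp
  | succ K ih =>
    have h2 : 2 * (K + 1) = (2 * K + 1) + 1 := by omega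
    rw [h2, List.range_succ, List.range_succ, ih, List.range_succ, List.flatMap_append]
    simp

-- B's doubling loop enumerates maskSub in mask order
theorem doubling (l : List Char) (subs : List (List Char)) :
    l.foldl (fun subs ch => subs ++ subs.map (fun t => t ++ [ch])) subs
    = (List.range (2 ^ l.length)).flatMap
        (fun m : Nat => subs.map (fun t => t ++ maskSub (m : Int) l)) := by
  induction l generalizing subs with
  | nil => simp [List.range_one, maskSub]
  | cons c l ih =>
    rw [List.foldl_cons, ih]
    have hl : 2 ^ (c :: l).length = 2 * 2 ^ l.length := by
      rw [List.length_cons, pow_succ, mul_comm]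
    rw [hl, range_pair, List.flatMap_assoc]
    apply List.flatMap_congr
    intro q _
    have he : ((2 * q : Nat) : Int) = 2 * (q : Int) := by push_cast; ring
    have ho : ((2 * q + 1 : Nat) : Int) = 2 * (q : Int) + 1 := by push_cast; ring
    simp only [List.flatMap_cons, List.flatMap_nil, List.append_nil, List.map_append,
      List.map_map, he, ho, maskSub_even, maskSub_odd]
    apply congrArg
    apply List.map_congr_left
    intro t _
    simp

-- the full mask enumeration starts with the empty subsequence (mask 0)
theorem rangeMap_cons (cs : List Char) :
    (List.range (2 ^ cs.length)).map (fun q : Nat => maskSub (q : Int) cs)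
    = [] :: ((List.range (2 ^ cs.length)).map (fun q : Nat => maskSub (q : Int) cs)).tail := by
  have h : 2 ^ cs.length = (2 ^ cs.length - 1) + 1 := by
    have := Nat.one_le_two_pow (n := cs.length)
    omega
  rw [h, List.range_succ_eq_map]
  simp [maskSub_zero]

-- the two unsorted enumerations are permutations of each other
theorem unsorted_perm (cs : List Char) :
    ((List.range cs.length).flatMap (fun k => combosA (k + 1) cs)).Perm
      (((List.range (2 ^ cs.length)).map (fun q : Nat => maskSub (q : Int) cs)).tail) := by
  have hB : (([] : List Char) ::
      ((List.range (2 ^ cs.length)).map (fun q : Nat => maskSub (q : Int) cs)).tail).Perm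
      (List.sublists' cs) := by
    rw [← rangeMap_cons]
    exact maskRange_perm cs
  exact List.Perm.cons_inv ((combos_range_perm cs).trans hB.symm)

-- A's outer loop, accumulated over an explicit list of (shifted) indices
theorem solveA_aux (cs : List Char) (l : List Nat) (acc : List String) :
    (l.map (fun k : Nat => ((k : Int) + 1))).foldl
      (fun l i => (combosA i.toNat cs).foldl (fun l e => l ++ [String.mk e]) l) acc
    = acc ++ (l.flatMap (fun k => combosA (k + 1) cs)).map String.mk := by
  induction l generalizing acc with
  | nil => simp
  | cons k l ih =>
    rw [List.map_cons, List.foldl_cons, PySem.List.foldl_append_singleton_eq_map, ih]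
    have h : ((k : Int) + 1).toNat = k + 1 := by omega
    rw [h, List.flatMap_cons, List.map_append, List.append_assoc]

-- ===== VERDICT (by name: the statement is the Claim_ definition above) =====
theorem solve_spec : Claim_equal_solve := by
  intro s _
  unfold Spec_solve solve solve_alt
  have hlen : PySem.Str.len s = (s.toList.length : Int) := by simp
  have hA : (PySem.List.pyRange 1 (PySem.Str.len s + 1) 1).foldl
      (fun l i => (combosA i.toNat s.toList).foldl (fun l e => l ++ [String.mk e]) l) []
      = ((List.range s.toList.length).flatMap (fun k => combosA (k + 1) s.toList)).map String.mk := by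
    rw [hlen, pyRange_one_succ, solveA_aux, List.nil_append]
  have hB : (PySem.List.slice
        (s.toList.foldl (fun subs ch => subs ++ subs.map (fun t => t ++ [ch])) [[]])
        (some 1) none)
      = ((List.range (2 ^ s.toList.length)).map
          (fun q : Nat => maskSub (q : Int) s.toList)).tail := by
    rw [PySem.List.slice_from_one, doubling]
    apply congrArg
    simp only [List.map_cons, List.map_nil, List.nil_append]
    exact flatMap_single _ _
  rw [hA, hB]
  exact PySem.List.sorted_eq_sorted_of_perm _ _ _ (fun a b h => h)
    ((unsorted_perm s.toList).map String.mk)
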